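-- pv_equiv track=rewrite | github.com/martinp3321/cs110 | alg/algpack.py | lastOccurMostFreqElem
-- ===== SOURCE A (Python) =====
-- def numOccur(lst, char):
-- 	count = 0
--
-- 	for elem in lst:
--
-- 		if elem == char:
-- 			count += 1
--
--
-- 	return count
--
-- def lastOccurMostFreqElem(lst):
-- 	"""
-- 	Returns the index of the last occurrence of the element that most frequently occurs
-- 	in list lst or -1 if lst is empty.
-- 	Examples:
-- 	>>> lastOccurMostFreqElem([0,0,2,2,0,2])
-- 	5
-- 	>>> lastOccurMostFreqElem([0,0,2,0,2])
-- 	3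
-- 	>>> lastOccurMostFreqElem([0])
-- 	0
-- 	>>> lastOccurMostFreqElem([0,0,2,2,9,9,9,9,0,2])
-- 	7
-- 	>>> lastOccurMostFreqElem([])
-- 	-1
-- 	>>> lastOccurMostFreqElem([0,0,0,0,0,0,0,0,0,0])
-- 	9
-- 	"""
--
-- 	nummf = 0
--
-- 	elemmf = -1
--
--
-- 	for elem in range(len(lst)):
--
-- 		count = numOccur(lst, lst[elem])
--
-- 		if count >= nummf:
-- 			nummf = count
-- 			elemmf = elem
--
--
-- 	return elemmf
-- ===== SOURCE B (Python) =====
-- def lastOccurMostFreqElem(lst):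
--     # One forward pass builds, per distinct element, (count, last index seen);
--     # a second pass over that table picks the record with the greatest count,
--     # ties going to the greater last index.
--     info = {}
--     for i, x in enumerate(lst):
--         cnt, _ = info.get(x, (0, -1))
--         info[x] = (cnt + 1, i)
--     bestc, best = 0, -1
--     for cnt, last in info.values():
--         if bestc < cnt or (cnt == bestc and best < last):
--             bestc, best = cnt, last
--     return best
-- ===== Notes on version B (the rewrite author's own statement) =====
-- stated objective: faster
-- what changed: Replaced A's per-index full rescans (numOccur over the whole list at every index) by a single aggregation pass building a dict of (count, last index) per distinct element, followed by a selection pass over that table.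
import Mathlib
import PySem

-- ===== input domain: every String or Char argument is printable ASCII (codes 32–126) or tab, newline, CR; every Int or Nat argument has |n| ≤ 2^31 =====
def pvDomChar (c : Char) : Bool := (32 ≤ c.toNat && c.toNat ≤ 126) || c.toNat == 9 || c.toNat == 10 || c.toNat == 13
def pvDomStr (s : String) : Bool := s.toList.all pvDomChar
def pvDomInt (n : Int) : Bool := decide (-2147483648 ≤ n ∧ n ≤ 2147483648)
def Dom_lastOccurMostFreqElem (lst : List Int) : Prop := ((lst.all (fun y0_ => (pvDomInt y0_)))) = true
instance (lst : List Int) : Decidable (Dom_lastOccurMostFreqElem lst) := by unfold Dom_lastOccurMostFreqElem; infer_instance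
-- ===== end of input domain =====

-- B replaces A's per-index full rescans by one dict-building pass (count, last index per
-- distinct element) plus a selection pass over the table; proved to return the same index.


-- ===== PORT A =====
def numOccur (lst : List Int) (char : Int) : Int :=
  lst.foldl (fun count elem => if elem == char then count + 1 else count) 0

def lastOccurMostFreqElem (lst : List Int) : Int :=
  ((PySem.List.pyRange 0 (PySem.List.len lst)).foldl
    (fun (st : Int × Int) elem =>
      -- st = (nummf, elemmf); lst[elem] with elem always in range: pyGetD is exact here
      let count := numOccur lst (PySem.List.pyGetD lst elem 0)
      if st.1 ≤ count then (count, elem) else st) ((0 : Int), (-1 : Int))).2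

-- ===== PORT B =====
def lastOccurMostFreqElem_alt (lst : List Int) : Int :=
  let info := (PySem.List.enumerate lst).foldl
    (fun (d : PySem.Dict Int (Int × Int)) p =>
      d.insert p.2 ((d.getD p.2 (0, -1)).1 + 1, p.1)) PySem.Dict.empty
  (info.values.foldl
    (fun (b : Int × Int) v =>
      if b.1 < v.1 ∨ (v.1 = b.1 ∧ b.2 < v.2) then v else b) ((0 : Int), (-1 : Int))).2

-- ===== PRECONDITION & SPEC =====
def Spec_lastOccurMostFreqElem (lst : List Int) (out : Int) : Prop := out = lastOccurMostFreqElem_alt lst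
instance (lst : List Int) (out : Int) : Decidable (Spec_lastOccurMostFreqElem lst out) := by unfold Spec_lastOccurMostFreqElem; infer_instance

-- ===== CLAIM (what is proved, stated in full; the proofs are below) =====
def Claim_equal_lastOccurMostFreqElem : Prop := ∀ (lst : List Int), Dom_lastOccurMostFreqElem lst → Spec_lastOccurMostFreqElem lst (lastOccurMostFreqElem lst)

-- ===== LEMMAS AND PROOFS =====

-- lexicographic "at most" on (count, index) pairs
def pvLexLe (p q : Int × Int) : Prop := p.1 < q.1 ∨ (p.1 = q.1 ∧ p.2 ≤ q.2)

-- the selection step of B (strict lexicographic improvement)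
def pvStepB (b v : Int × Int) : Int × Int :=
  if b.1 < v.1 ∨ (v.1 = b.1 ∧ b.2 < v.2) then v else b

-- the selection step of A (count >= running max)
def pvStepA (s v : Int × Int) : Int × Int := if s.1 ≤ v.1 then v else s

-- the per-index (count, index) pairs A effectively folds over
def pvPairs (lst : List Int) : List (Int × Int) :=
  (List.range lst.length).map (fun i => ((lst.count (lst.getD i 0) : Int), (i : Int)))

-- B's dict-building fold
def pvF (lst : List Int) : PySem.Dict Int (Int × Int) :=
  (PySem.List.enumerate lst).foldl
    (fun (d : PySem.Dict Int (Int × Int)) p =>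
      d.insert p.2 ((d.getD p.2 (0, -1)).1 + 1, p.1)) PySem.Dict.empty

theorem pvLexLe_trans {p q r : Int × Int} (h1 : pvLexLe p q) (h2 : pvLexLe q r) : pvLexLe p r := by
  unfold pvLexLe at *; omega

theorem pvLexLe_antisymm {p q : Int × Int} (h1 : pvLexLe p q) (h2 : pvLexLe q p) : p = q := by
  unfold pvLexLe at *
  obtain ⟨a, b⟩ := p; obtain ⟨c, d⟩ := q
  simp_all; omega

theorem pvBestB (ps : List (Int × Int)) (z : Int × Int) :
    (ps.foldl pvStepB z = z ∨ ps.foldl pvStepB z ∈ ps) ∧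
    pvLexLe z (ps.foldl pvStepB z) ∧
    ∀ p ∈ ps, pvLexLe p (ps.foldl pvStepB z) := by
  induction ps generalizing z with
  | nil => simp [pvLexLe]
  | cons p t ih =>
    obtain ⟨hmem, hz, hall⟩ := ih (pvStepB z p)
    have hstep : pvStepB z p = z ∨ pvStepB z p = p := by
      unfold pvStepB; split <;> simp
    have hzle : pvLexLe z (pvStepB z p) := by
      unfold pvStepB pvLexLe; split <;> omega
    have hple : pvLexLe p (pvStepB z p) := by
      unfold pvStepB pvLexLe; split <;> omega
    refine ⟨?_, ?_, ?_⟩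
    · simp only [List.foldl_cons]
      rcases hmem with h | h
      · rw [h]; rcases hstep with h' | h' <;> simp [h']
      · simp [h]
    · exact pvLexLe_trans hzle hz
    · intro q hq
      rcases List.mem_cons.mp hq with rfl | hq
      · exact pvLexLe_trans hple hz
      · exact hall q hq

theorem pvFoldAB (ps : List (Int × Int)) (z : Int × Int)
    (hp : ps.Pairwise (fun p q => p.2 < q.2)) (hz : ∀ p ∈ ps, z.2 < p.2) :
    ps.foldl pvStepA z = ps.foldl pvStepB z := by
  induction ps generalizing z with
  | nil => rfl
  | cons p t ih =>
    have hzp : z.2 < p.2 := hz p (by simp)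
    have hstep : pvStepA z p = pvStepB z p := by
      unfold pvStepA pvStepB; split <;> split <;> first | rfl | omega
    have hmem : pvStepB z p = z ∨ pvStepB z p = p := by
      unfold pvStepB; split <;> simp
    simp only [List.foldl_cons, hstep]
    apply ih (pvStepB z p) (List.Pairwise.of_cons hp)
    intro q hq
    rcases hmem with h | h
    · rw [h]; exact lt_trans hzp ((List.pairwise_cons.mp hp).1 q hq)
    · rw [h]; exact (List.pairwise_cons.mp hp).1 q hq

-- A's port is the pvStepA fold over pvPairs
theorem pvA_eq (lst : List Int) :
    lastOccurMostFreqElem lst = ((pvPairs lst).foldl pvStepA ((0 : Int), (-1 : Int))).2 := by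
  unfold lastOccurMostFreqElem pvPairs
  have hlen : PySem.List.len lst = ((lst.length : Nat) : Int) := rfl
  rw [hlen, PySem.List.pyRange_zero_natCast, List.foldl_map, List.foldl_map]
  congr 1
  apply PySem.List.foldl_congr_mem
  intro acc i hi
  simp only [PySem.List.pyGetD_natCast]
  have : numOccur lst (lst.getD i 0) = (lst.count (lst.getD i 0) : Int) := by
    unfold numOccur
    rw [PySem.List.foldl_beq_add_one]
    omega
  simp only [this, pvStepA]

-- (enumerate lst).map (·.2) = lst
theorem pvEnumSnd (lst : List Int) (s : Int) :
    (PySem.List.enumerate lst s).map (fun p => p.2) = lst := by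
  induction lst generalizing s with
  | nil => rfl
  | cons x t ih => rw [PySem.List.enumerate_cons]; simp [ih]

theorem pvF_snoc (ys : List Int) (a : Int) :
    pvF (ys ++ [a]) =
      (pvF ys).insert a (((pvF ys).getD a (0, -1)).1 + 1, (ys.length : Int)) := by
  unfold pvF
  rw [PySem.List.enumerate_append, List.foldl_append]
  simp [PySem.List.enumerate_cons, PySem.List.enumerate_nil]

-- characterization of B's dict: count and last index per element
theorem pvF_spec (lst : List Int) (x : Int) :
    (x ∈ lst → ∃ j : Nat, (pvF lst).get? x = some ((lst.count x : Int), (j : Int)) ∧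
        j < lst.length ∧ lst[j]? = some x ∧
        (∀ i : Nat, i < lst.length → lst[i]? = some x → i ≤ j)) ∧
    (x ∉ lst → (pvF lst).get? x = none) := by
  induction lst using List.reverseRecOn with
  | nil => simp [pvF, PySem.List.enumerate_nil, PySem.Dict.get?_empty]
  | append_singleton ys a ih =>
    rw [pvF_snoc]
    constructor
    · intro hx
      by_cases hxa : x = a
      · subst hxa
        refine ⟨ys.length, ?_, by simp, by simp, ?_⟩
        · rw [PySem.Dict.get?_insert]
          rw [if_pos rfl]
          by_cases hmem : x ∈ ys
          · obtain ⟨j, hget, _, _, _⟩ := ih.1 hmem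
            rw [PySem.Dict.getD_eq_get?_getD, hget]
            simp [List.count_append]
          · rw [PySem.Dict.getD_eq_get?_getD, ih.2 hmem]
            simp [List.count_append, List.count_eq_zero_of_not_mem hmem]
        · intro i hi _; simp at hi; omega
      · obtain hmem : x ∈ ys := by
          rcases List.mem_append.mp hx with h | h
          · exact h
          · simp at h; exact absurd h hxa
        obtain ⟨j, hget, hj, hjx, hmax⟩ := ih.1 hmem
        refine ⟨j, ?_, by simp; omega, ?_, ?_⟩
        · rw [PySem.Dict.get?_insert, if_neg hxa, hget]
          simp [List.count_append, List.count_singleton]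
          intro h; exact absurd h.symm hxa
        · rw [List.getElem?_append_left hj]; exact hjx
        · intro i hi hix
          simp at hi
          by_cases hilt : i < ys.length
          · exact hmax i hilt (by rw [List.getElem?_append_left hilt] at hix; exact hix)
          · exfalso
            have : i = ys.length := by omega
            subst this
            rw [List.getElem?_concat_length] at hix
            simp at hix
            exact hxa hix.symm
    · intro hx
      have hxa : x ≠ a := by intro h; subst h; simp at hx
      have hmem : x ∉ ys := by intro h; exact hx (List.mem_append.mpr (Or.inl h))
      rw [PySem.Dict.get?_insert, if_neg hxa]
      exact ih.2 hmem

theorem pvF_keys (lst : List Int) : (pvF lst).keys = PySem.Set.ofList lst := by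
  unfold pvF
  rw [PySem.Dict.keys_foldl_insert_key (PySem.List.enumerate lst) (fun p => p.2)
      (fun d p => ((d.getD p.2 (0, -1)).1 + 1, p.1)) PySem.Dict.empty]
  rw [pvEnumSnd]
  rw [PySem.Set.ofList_eq_foldl]
  rfl

theorem pvF_nodup (lst : List Int) : (pvF lst).keys.Nodup := by
  unfold pvF
  exact PySem.Dict.nodup_keys_foldl_insert_key (PySem.List.enumerate lst)
    (fun p : Int × Int => p.2) (fun d p => ((d.getD p.2 (0, -1)).1 + 1, p.1))
    PySem.Dict.empty PySem.Dict.nodup_keys_empty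

-- ===== main equality =====
theorem pvMain (lst : List Int) : lastOccurMostFreqElem lst = lastOccurMostFreqElem_alt lst := by
  have hBdef : lastOccurMostFreqElem_alt lst
      = (((pvF lst).values).foldl pvStepB ((0 : Int), (-1 : Int))).2 := rfl
  have hQvals : (pvF lst).values
      = (PySem.Set.ofList lst).map (fun k => (pvF lst).getD k (0, -1)) := by
    rw [PySem.Dict.values_eq_map_keys (pvF lst) (pvF_nodup lst) (0, -1), pvF_keys]
  -- every value of B's dict is one of A's (count, index) pairs
  have hQsub : ∀ q ∈ (pvF lst).values, q ∈ pvPairs lst := by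
    intro q hq
    rw [hQvals] at hq
    obtain ⟨x, hxk, hxq⟩ := List.mem_map.mp hq
    have hxl : x ∈ lst := (PySem.Set.mem_ofList lst x).mp hxk
    obtain ⟨j, hget, hj, hjx, _⟩ := (pvF_spec lst x).1 hxl
    have hq' : q = ((lst.count x : Int), (j : Int)) := by
      rw [← hxq, PySem.Dict.getD_eq_get?_getD, hget]; rfl
    unfold pvPairs
    apply List.mem_map.mpr
    refine ⟨j, List.mem_range.mpr hj, ?_⟩
    have hgd : lst.getD j 0 = x := by
      rw [List.getD_eq_getElem?_getD, hjx]; rfl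
    rw [hgd, ← hq']
  -- every (count, index) pair of A is lex-dominated by a value of B's dict
  have hPdom : ∀ p ∈ pvPairs lst, ∃ q ∈ (pvF lst).values, pvLexLe p q := by
    intro p hp
    unfold pvPairs at hp
    obtain ⟨i, hir, hip⟩ := List.mem_map.mp hp
    have hi : i < lst.length := List.mem_range.mp hir
    have hxl : lst.getD i 0 ∈ lst := by
      rw [List.getD_eq_getElem?_getD, List.getElem?_eq_getElem hi]
      exact List.getElem_mem hi
    obtain ⟨j, hget, hj, hjx, hmax⟩ := (pvF_spec lst (lst.getD i 0)).1 hxl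
    refine ⟨((lst.count (lst.getD i 0) : Int), (j : Int)), ?_, ?_⟩
    · rw [hQvals]
      apply List.mem_map.mpr
      refine ⟨lst.getD i 0, (PySem.Set.mem_ofList lst _).mpr hxl, ?_⟩
      rw [PySem.Dict.getD_eq_get?_getD, hget]; rfl
    · have hij : i ≤ j := hmax i hi (by
        rw [List.getElem?_eq_getElem hi, List.getD_eq_getElem?_getD,
          List.getElem?_eq_getElem hi]; rfl)
      rw [← hip]; unfold pvLexLe
      right
      refine ⟨rfl, ?_⟩
      show (i : Int) ≤ (j : Int)
      exact_mod_cast hij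
  -- both folds compute the lexicographic maximum, hence coincide
  obtain ⟨hm1, hz1, hall1⟩ := pvBestB (pvPairs lst) ((0 : Int), (-1 : Int))
  obtain ⟨hm2, hz2, hall2⟩ := pvBestB ((pvF lst).values) ((0 : Int), (-1 : Int))
  have h12 : pvLexLe ((pvPairs lst).foldl pvStepB ((0 : Int), (-1 : Int)))
      (((pvF lst).values).foldl pvStepB ((0 : Int), (-1 : Int))) := by
    rcases hm1 with h | h
    · rw [h]; exact hz2
    · obtain ⟨q, hqQ, hpq⟩ := hPdom _ h
      exact pvLexLe_trans hpq (hall2 q hqQ)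
  have h21 : pvLexLe (((pvF lst).values).foldl pvStepB ((0 : Int), (-1 : Int)))
      ((pvPairs lst).foldl pvStepB ((0 : Int), (-1 : Int))) := by
    rcases hm2 with h | h
    · rw [h]; exact hz1
    · exact hall1 _ (hQsub _ h)
  have heq := pvLexLe_antisymm h12 h21
  -- A's ≥-update fold equals the strict lexicographic fold on its pairs
  have hApairwise : (pvPairs lst).Pairwise (fun p q : Int × Int => p.2 < q.2) := by
    unfold pvPairs
    refine List.Pairwise.map _ ?_ List.pairwise_lt_range
    intro a b hab
    show (a : Int) < (b : Int)
    exact_mod_cast hab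
  have hAz : ∀ p ∈ pvPairs lst, (((0 : Int), (-1 : Int)) : Int × Int).2 < p.2 := by
    intro p hp
    unfold pvPairs at hp
    obtain ⟨i, _, hip⟩ := List.mem_map.mp hp
    rw [← hip]
    show (-1 : Int) < (i : Int)
    omega
  rw [pvA_eq lst, hBdef,
    pvFoldAB (pvPairs lst) ((0 : Int), (-1 : Int)) hApairwise hAz, heq]

-- ===== VERDICT (by name: the statement is the Claim_ definition above) =====
theorem lastOccurMostFreqElem_spec : Claim_equal_lastOccurMostFreqElem := by
  intro lst _
  unfold Spec_lastOccurMostFreqElem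
  exact pvMain lst
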